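-- pv_equiv track=rewrite | github.com/dev-hmsk/boardgame | board/board.py | _generate_board_space_color
-- ===== SOURCE A (Python) =====
-- def _generate_board_space_color(xy_coord):
--     # (1,1) or bottom-most left is a black square
--     black_spaces = []
--     white_spaces = []
--     for location in xy_coord:
--         x_coord = location[0]
--         y_coord = location[1]
--         # Black Spaces aka legal piece spaces
--         if x_coord % 2 == 0 and y_coord % 2 == 0:
--             black_spaces.append(location)
--         if x_coord % 2 != 0 and y_coord % 2 != 0:
--             black_spaces.append(location)
--         # White Spaces aka empty spaces
--         if x_coord % 2 != 0 and y_coord % 2 == 0: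
--             white_spaces.append(location)
--         if x_coord % 2 == 0 and y_coord % 2 != 0:
--             white_spaces.append(location)
--
--     sorted_black_list = sorted(black_spaces, key=lambda x: x[0])
--     sorted_white_list = sorted(white_spaces, key=lambda x: x[0])
--     return sorted_black_list, sorted_white_list  # Return black and then white
-- ===== SOURCE B (Python) =====
-- def _generate_board_space_color(xy_coord):
--     # Bucket locations by x in a dict (insertion order inside each bucket),
--     # sort only the distinct x keys, then emit each bucket split by parity.
--     buckets = {}
--     for location in xy_coord:
--         buckets.setdefault(location[0], []).append(location)
--     black_spaces = []
--     white_spaces = []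
--     for x in sorted(buckets):
--         for location in buckets[x]:
--             if (location[0] - location[1]) % 2 == 0:
--                 black_spaces.append(location)
--             else:
--                 white_spaces.append(location)
--     return black_spaces, white_spaces
-- ===== Notes on version B (the rewrite author's own statement) =====
-- stated objective: alternative
-- what changed: B replaces classify-then-comparison-sort-each-list with hash bucketing: it groups the locations into a dict keyed by x, sorts only the distinct x keys, and walks the buckets in key order splitting each by (x-y) parity, so only unique keys are ever compared.
import Mathlib
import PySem

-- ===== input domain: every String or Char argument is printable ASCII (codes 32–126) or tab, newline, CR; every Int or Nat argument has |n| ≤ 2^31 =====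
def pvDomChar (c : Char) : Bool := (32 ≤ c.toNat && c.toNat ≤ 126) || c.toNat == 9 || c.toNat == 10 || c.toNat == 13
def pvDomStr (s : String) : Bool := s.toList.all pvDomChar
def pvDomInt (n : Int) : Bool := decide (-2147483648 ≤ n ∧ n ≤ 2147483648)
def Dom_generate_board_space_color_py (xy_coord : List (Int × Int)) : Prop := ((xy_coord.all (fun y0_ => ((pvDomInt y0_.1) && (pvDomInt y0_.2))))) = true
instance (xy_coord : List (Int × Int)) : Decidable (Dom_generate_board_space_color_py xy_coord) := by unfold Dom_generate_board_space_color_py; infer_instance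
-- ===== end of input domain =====

-- B groups locations into a dict keyed by x, sorts only the distinct x keys and emits
-- each bucket split by (x-y) parity, instead of classifying into two lists and sorting each.


-- ===== PORT A =====
-- one iteration of A's loop: the four independent `if` statements, in order
def pvStepA (acc : List (Int × Int) × List (Int × Int)) (location : Int × Int) :
    List (Int × Int) × List (Int × Int) :=
  let x_coord := location.1
  let y_coord := location.2
  let acc := if PySem.Int.mod x_coord 2 == 0 && PySem.Int.mod y_coord 2 == 0 then
    (acc.1 ++ [location], acc.2) else acc
  let acc := if !(PySem.Int.mod x_coord 2 == 0) && !(PySem.Int.mod y_coord 2 == 0) then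
    (acc.1 ++ [location], acc.2) else acc
  let acc := if !(PySem.Int.mod x_coord 2 == 0) && PySem.Int.mod y_coord 2 == 0 then
    (acc.1, acc.2 ++ [location]) else acc
  let acc := if PySem.Int.mod x_coord 2 == 0 && !(PySem.Int.mod y_coord 2 == 0) then
    (acc.1, acc.2 ++ [location]) else acc
  acc

def generate_board_space_color_py (xy_coord : List (Int × Int)) :
    (List (Int × Int)) × (List (Int × Int)) :=
  let spaces := xy_coord.foldl pvStepA ([], [])
  let sorted_black_list := PySem.List.sorted spaces.1 (fun x => x.1)
  let sorted_white_list := PySem.List.sorted spaces.2 (fun x => x.1)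
  (sorted_black_list, sorted_white_list)

-- ===== PORT B =====
-- buckets.setdefault(location[0], []).append(location), faithfully as Dict.modify
def pvBuckets (xy_coord : List (Int × Int)) : PySem.Dict Int (List (Int × Int)) :=
  xy_coord.foldl (fun d l => d.modify l.1 [] (fun b => b ++ [l])) PySem.Dict.empty

def generate_board_space_color_py_alt (xy_coord : List (Int × Int)) :
    (List (Int × Int)) × (List (Int × Int)) :=
  let buckets := pvBuckets xy_coord
  (PySem.List.sorted buckets.keys (fun k => k)).foldl
    (fun acc x =>
      (buckets.getD x []).foldl
        (fun acc location =>
          if PySem.Int.mod (location.1 - location.2) 2 == 0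
          then (acc.1 ++ [location], acc.2)
          else (acc.1, acc.2 ++ [location])) acc)
    ([], [])

-- ===== PRECONDITION & SPEC =====
def Spec_generate_board_space_color_py (xy_coord : List (Int × Int)) (out : (List (Int × Int)) × (List (Int × Int))) : Prop := out = generate_board_space_color_py_alt xy_coord
instance (xy_coord : List (Int × Int)) (out : (List (Int × Int)) × (List (Int × Int))) : Decidable (Spec_generate_board_space_color_py xy_coord out) := by unfold Spec_generate_board_space_color_py; infer_instance

-- ===== CLAIM (what is proved, stated in full; the proofs are below) =====
def Claim_equal_generate_board_space_color_py : Prop := ∀ (xy_coord : List (Int × Int)), Dom_generate_board_space_color_py xy_coord → Spec_generate_board_space_color_py xy_coord (generate_board_space_color_py xy_coord)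

-- ===== LEMMAS AND PROOFS =====

-- B's parity test, the form both loop-shape lemmas are stated over
def pvBlack (location : Int × Int) : Bool :=
  PySem.Int.mod (location.1 - location.2) 2 == 0

-- A's four parity tests collapse to B's single test
lemma pvStepA_eq (acc : List (Int × Int) × List (Int × Int)) (l : Int × Int) :
    pvStepA acc l =
      if pvBlack l then (acc.1 ++ [l], acc.2) else (acc.1, acc.2 ++ [l]) := by
  simp only [pvStepA, pvBlack,
    PySem.Int.mod_eq_emod_of_pos (b := 2) (by norm_num)]
  rcases Int.emod_two_eq l.1 with hx | hx <;> rcases Int.emod_two_eq l.2 with hy | hy <;>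
    simp [hx, hy, Int.sub_emod]

-- A's loop computes (filter black, filter white) appended to the accumulator
lemma pvFoldA (xs : List (Int × Int)) (acc : List (Int × Int) × List (Int × Int)) :
    xs.foldl pvStepA acc =
      (acc.1 ++ xs.filter pvBlack, acc.2 ++ xs.filter (fun l => !pvBlack l)) := by
  induction xs generalizing acc with
  | nil => simp
  | cons l xs ih =>
      rw [List.foldl_cons, pvStepA_eq]
      by_cases h : pvBlack l = true <;> simp [h, ih]

-- B's inner classification pass is the same partition step
lemma pvFoldB (xs : List (Int × Int)) (acc : List (Int × Int) × List (Int × Int)) :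
    xs.foldl (fun acc location =>
        if PySem.Int.mod (location.1 - location.2) 2 == 0
        then (acc.1 ++ [location], acc.2)
        else (acc.1, acc.2 ++ [location])) acc =
      (acc.1 ++ xs.filter pvBlack, acc.2 ++ xs.filter (fun l => !pvBlack l)) := by
  induction xs generalizing acc with
  | nil => simp
  | cons l xs ih =>
      rw [List.foldl_cons]
      by_cases h : pvBlack l = true
      · rw [if_pos (show (PySem.Int.mod (l.1 - l.2) 2 == 0) = true from h), ih]
        simp [h]
      · rw [if_neg (show ¬ (PySem.Int.mod (l.1 - l.2) 2 == 0) = true from h), ih]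
        simp [h]

-- inserting below every element prepends
lemma pvInsert_all_lt {α κ : Type} [LinearOrder κ] (key : α → κ) (x : α) (zs : List α)
    (h : ∀ z ∈ zs, key x < key z) :
    PySem.List.insertBy (fun a b => decide (key a < key b)) x zs = x :: zs := by
  cases zs with
  | nil => rfl
  | cons z zs => simp [PySem.List.insertBy, h z (by simp)]

-- STABILITY: filtering commutes with one sorted insertion into a sorted list
lemma pvFilter_insertBy {α κ : Type} [LinearOrder κ] (p : α → Bool) (key : α → κ)
    (x : α) (ys : List α) (h : ys.Pairwise (fun a b => key a ≤ key b)) :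
    (PySem.List.insertBy (fun a b => decide (key a < key b)) x ys).filter p =
      if p x then PySem.List.insertBy (fun a b => decide (key a < key b)) x (ys.filter p)
      else ys.filter p := by
  induction ys with
  | nil => by_cases hx : p x = true <;> simp [PySem.List.insertBy, hx]
  | cons y ys ih =>
      rcases List.pairwise_cons.mp h with ⟨hy, hys⟩
      by_cases hlt : key x < key y
      · rw [show PySem.List.insertBy (fun a b => decide (key a < key b)) x (y :: ys)
              = x :: y :: ys by simp [PySem.List.insertBy, hlt]]
        by_cases hx : p x = true
        · rw [List.filter_cons_of_pos hx, if_pos hx,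
            pvInsert_all_lt key x ((y :: ys).filter p)]
          intro z hz
          rcases List.mem_cons.mp (List.mem_of_mem_filter hz) with rfl | hz'
          · exact hlt
          · exact lt_of_lt_of_le hlt (hy z hz')
        · simp at hx
          simp [hx]
      · rw [show PySem.List.insertBy (fun a b => decide (key a < key b)) x (y :: ys)
              = y :: PySem.List.insertBy (fun a b => decide (key a < key b)) x ys by
            simp [PySem.List.insertBy, hlt]]
        by_cases hx : p x = true <;> by_cases hyp : p y = true
        · rw [List.filter_cons_of_pos hyp, ih hys, if_pos hx, if_pos hx,
            List.filter_cons_of_pos hyp,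
            show PySem.List.insertBy (fun a b => decide (key a < key b)) x
                (y :: ys.filter p)
              = y :: PySem.List.insertBy (fun a b => decide (key a < key b)) x
                  (ys.filter p) by simp [PySem.List.insertBy, hlt]]
        · rw [List.filter_cons_of_neg (by simpa using hyp), ih hys, if_pos hx, if_pos hx,
            List.filter_cons_of_neg (by simpa using hyp)]
        · rw [List.filter_cons_of_pos hyp, ih hys, if_neg (by simpa using hx),
            if_neg (by simpa using hx), List.filter_cons_of_pos hyp]
        · rw [List.filter_cons_of_neg (by simpa using hyp), ih hys,
            if_neg (by simpa using hx), if_neg (by simpa using hx),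
            List.filter_cons_of_neg (by simpa using hyp)]

-- STABILITY, list form: filter after stable sort = stable sort after filter
lemma pvFilter_sorted {α κ : Type} [LinearOrder κ] (p : α → Bool) (key : α → κ)
    (xs : List α) :
    (PySem.List.sorted xs key).filter p = PySem.List.sorted (xs.filter p) key := by
  rw [PySem.List.sorted_eq_foldl_insertBy, PySem.List.sorted_eq_foldl_insertBy]
  suffices h : ∀ (acc : List α), acc.Pairwise (fun a b => key a ≤ key b) →
      (xs.foldl (fun acc x => PySem.List.insertBy (fun a b => decide (key a < key b)) x acc) acc).filter p
        = (xs.filter p).foldl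
            (fun acc x => PySem.List.insertBy (fun a b => decide (key a < key b)) x acc)
            (acc.filter p) by
    simpa using h [] (by simp)
  induction xs with
  | nil => intro acc _; simp
  | cons x xs ih =>
      intro acc hacc
      by_cases hx : p x = true
      · rw [List.foldl_cons, ih _ (PySem.List.insertBy_pairwise_le key x acc hacc),
          pvFilter_insertBy p key x acc hacc, if_pos hx,
          List.filter_cons_of_pos hx, List.foldl_cons]
      · rw [List.foldl_cons, ih _ (PySem.List.insertBy_pairwise_le key x acc hacc),
          pvFilter_insertBy p key x acc hacc, if_neg (by simpa using hx),
          List.filter_cons_of_neg (by simpa using hx)]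

-- bucket lookup: the x-bucket is the filter of the input on x
lemma pvBuckets_getD (xs : List (Int × Int)) (k : Int) :
    (pvBuckets xs).getD k [] = xs.filter (fun l => l.1 == k) := by
  unfold pvBuckets
  rw [show xs.foldl (fun d l => d.modify l.1 [] (fun b => b ++ [l])) PySem.Dict.empty
        = (xs.map (fun l => (l.1, l))).foldl
            (fun d p => d.modify p.1 [] (fun b => b ++ [p.2])) PySem.Dict.empty by
      rw [List.foldl_map]]
  rw [PySem.Dict.getD_foldl_modify_append]
  simp [List.filter_map, Function.comp_def]

-- bucket keys: the distinct x values, in first-occurrence order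
lemma pvBuckets_keys (xs : List (Int × Int)) :
    (pvBuckets xs).keys = PySem.Set.ofList (xs.map (fun l => l.1)) := by
  unfold pvBuckets
  rw [PySem.Dict.keys_foldl_modify_key]
  simp [PySem.Set.update_nil_left]

-- a key≤-sorted list whose keys lie in a strictly increasing key list
-- is the concatenation of its key-groups, in key order
lemma pvPrefix (k : Int) (l : List (Int × Int))
    (hl : l.Pairwise (fun a b => a.1 ≤ b.1)) (hmin : ∀ x ∈ l, k ≤ x.1) :
    l = l.filter (fun x => x.1 == k) ++ l.filter (fun x => !(x.1 == k)) := by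
  induction l with
  | nil => simp
  | cons y r ih =>
      rcases List.pairwise_cons.mp hl with ⟨hy, hr⟩
      by_cases hk : y.1 = k
      · rw [List.filter_cons_of_pos (by simp [hk]),
          List.filter_cons_of_neg (by simp [hk])]
        simpa using ih hr (fun x hx => hmin x (by simp [hx]))
      · have hall : ∀ x ∈ y :: r, ¬(x.1 = k) := by
          intro x hx
          rcases List.mem_cons.mp hx with rfl | hx'
          · exact hk
          · have h1 : k < y.1 := lt_of_le_of_ne (hmin y (by simp)) (Ne.symm hk)
            exact fun h => absurd (h ▸ hy x hx') (not_le.mpr h1)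
        rw [List.filter_eq_nil_iff.mpr (by intro x hx; simp [hall x hx]),
          List.filter_eq_self.mpr (by intro x hx; simp [hall x hx])]
        simp

lemma pvFlatMap_groups (ks : List Int) (l : List (Int × Int))
    (hl : l.Pairwise (fun a b => a.1 ≤ b.1))
    (hks : ks.Pairwise (· < ·))
    (hmem : ∀ k, k ∈ ks ↔ ∃ x ∈ l, x.1 = k) :
    ks.flatMap (fun k => l.filter (fun x => x.1 == k)) = l := by
  induction ks generalizing l with
  | nil =>
      cases l with
      | nil => simp
      | cons y r => exact absurd ((hmem y.1).mpr ⟨y, by simp⟩) (by simp)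
  | cons k ks ih =>
      rcases List.pairwise_cons.mp hks with ⟨hklt, hks'⟩
      have hmin : ∀ x ∈ l, k ≤ x.1 := by
        intro x hx
        rcases List.mem_cons.mp ((hmem x.1).mpr ⟨x, hx, rfl⟩) with h | h
        · exact le_of_eq h.symm
        · exact le_of_lt (hklt _ h)
      set t := l.filter (fun x => !(x.1 == k)) with ht
      have hfilter : ∀ k' ∈ ks, l.filter (fun x => x.1 == k') = t.filter (fun x => x.1 == k') := by
        intro k' hk'
        have hne : k ≠ k' := ne_of_lt (hklt k' hk')
        rw [ht, List.filter_filter]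
        apply List.filter_congr
        intro x _
        by_cases hx : x.1 = k' <;> simp [hx, Ne.symm hne]
      have htail : ks.flatMap (fun k => l.filter (fun x => x.1 == k)) = t := by
        rw [List.flatMap_congr (fun k' hk' => hfilter k' hk')]
        apply ih
        · exact List.Pairwise.filter _ hl
        · exact hks'
        · intro k'
          constructor
          · intro hk'
            rcases (hmem k').mp (by simp [hk']) with ⟨x, hx, hxk⟩
            exact ⟨x, List.mem_filter.mpr ⟨hx, by simp [hxk]; exact ne_of_gt (hklt k' hk')⟩, hxk⟩
          · rintro ⟨x, hx, rfl⟩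
            have hxl := List.mem_filter.mp hx
            rcases List.mem_cons.mp ((hmem x.1).mpr ⟨x, hxl.1, rfl⟩) with h | h
            · exact absurd h (by simpa using hxl.2)
            · exact h
      rw [List.flatMap_cons, htail, ht, ← pvPrefix k l hl hmin]

-- elements of one bucket all share the key, so the bucket is already key-sorted
lemma pvFilter_key_sorted (xs : List (Int × Int)) (k : Int) :
    PySem.List.sorted (xs.filter (fun l => l.1 == k)) (fun x => x.1) =
      xs.filter (fun l => l.1 == k) := by
  apply PySem.List.sorted_eq_self_of_pairwise
  have : ∀ a ∈ xs.filter (fun l => l.1 == k), a.1 = k := by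
    intro a ha; simpa using (List.mem_filter.mp ha).2
  apply List.pairwise_of_forall_mem_list
  intro a ha b hb
  rw [this a ha, this b hb]

-- fold of the classification step over a flatMap is the nested double loop
lemma pvFoldl_flatMap {α β γ : Type} (f : α → List β) (g : γ → β → γ)
    (ks : List α) (init : γ) :
    (ks.flatMap f).foldl g init = ks.foldl (fun acc k => (f k).foldl g acc) init := by
  induction ks generalizing init with
  | nil => simp
  | cons k ks ih => simp [List.flatMap_cons, List.foldl_append, ih]

-- ===== VERDICT (by name: the statement is the Claim_ definition above) =====
theorem generate_board_space_color_py_spec : Claim_equal_generate_board_space_color_py := by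
  intro xy_coord _
  unfold Spec_generate_board_space_color_py
  unfold generate_board_space_color_py generate_board_space_color_py_alt
  simp only [pvBuckets_getD, pvBuckets_keys, pvFoldA, List.nil_append]
  rw [← pvFoldl_flatMap (fun k => xy_coord.filter (fun l => l.1 == k))
      (fun acc location =>
        if PySem.Int.mod (location.1 - location.2) 2 == 0
        then (acc.1 ++ [location], acc.2)
        else (acc.1, acc.2 ++ [location]))]
  have hflat :
      (PySem.List.sorted (PySem.Set.ofList (xy_coord.map (fun l => l.1))) (fun k => k)).flatMap
        (fun k => xy_coord.filter (fun l => l.1 == k)) =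
      PySem.List.sorted xy_coord (fun x => x.1) := by
    have hrewrite : ∀ k, xy_coord.filter (fun l => l.1 == k) =
        (PySem.List.sorted xy_coord (fun x => x.1)).filter (fun l => l.1 == k) := by
      intro k
      rw [pvFilter_sorted, pvFilter_key_sorted]
    rw [List.flatMap_congr (fun k _ => hrewrite k)]
    apply pvFlatMap_groups
    · exact PySem.List.sorted_pairwise xy_coord (fun x => x.1)
    · exact PySem.List.sorted_ofList_pairwise_lt (xy_coord.map (fun l => l.1))
    · intro k
      rw [PySem.List.mem_sorted]
      constructor
      · intro hk
        have hk' : k ∈ xy_coord.map (fun l => l.1) := by simpa [pysem] using hk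
        rcases List.mem_map.mp hk' with ⟨x, hx, rfl⟩
        exact ⟨x, (PySem.List.mem_sorted _ _ _ _).mpr hx, rfl⟩
      · rintro ⟨x, hx, rfl⟩
        have : x.1 ∈ xy_coord.map (fun l => l.1) :=
          List.mem_map.mpr ⟨x, (PySem.List.mem_sorted _ _ _ _).mp hx, rfl⟩
        simpa [pysem] using this
  rw [hflat, pvFoldB]
  simp only [List.nil_append]
  rw [pvFilter_sorted pvBlack (fun x => x.1),
    pvFilter_sorted (fun l => !pvBlack l) (fun x => x.1)]
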